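-- pv_equiv track=rewrite | github.com/BenOckmore/aoc25 | src/day06/__init__.py | yield_results
-- ===== SOURCE A (Python) =====
-- from collections.abc import Generator
--
-- def yield_results(puzzle_input: list[str]) -> Generator[int]:
--     ops = iter(x for x in puzzle_input[-1].strip().split())
--     op = next(ops)
--
--     accum = 0 if op == "+" else 1
--     break_tuple = (" ",) * (len(puzzle_input) - 1)
--     nums = list(map(tuple, zip(*puzzle_input[:-1], strict=True)))
--     for num in nums:
--         if num == break_tuple:
--             op = next(ops)
--             yield accum
--             accum = 0 if op == "+" else 1
--         else:
--             accum = (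
--                 accum + int("".join(num)) if op == "+" else accum * int("".join(num))
--             )
--
--     yield accum
-- ===== SOURCE B (Python) =====
-- def yield_results(puzzle_input):
--     # Generator like A: transpose, partition columns into groups at blank
--     # columns (keeping empty groups), then pair each group with its op token.
--     *num_lines, op_line = puzzle_input
--     cols = list(zip(*num_lines, strict=True))
--     blank = (" ",) * len(num_lines)
--     done = []
--     cur = []
--     for c in cols:
--         if c == blank:
--             done.append(cur)
--             cur = []
--         else:
--             cur.append(c)
--     done.append(cur)
--     ops = op_line.strip().split()
--     for group, op in zip(done, ops):
--         if op == "+":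
--             yield sum(int("".join(c)) for c in group)
--         else:
--             v = 1
--             for c in group:
--                 v *= int("".join(c))
--             yield v
-- ===== Notes on version B (the rewrite author's own statement) =====
-- stated objective: simpler
-- what changed: B first partitions the transposed columns into groups separated by blank columns and then maps each (group, op) pair independently to its sum/product, instead of A's single stateful loop that threads the current op, a running accumulator and mid-loop next(ops) calls.
import Mathlib
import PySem

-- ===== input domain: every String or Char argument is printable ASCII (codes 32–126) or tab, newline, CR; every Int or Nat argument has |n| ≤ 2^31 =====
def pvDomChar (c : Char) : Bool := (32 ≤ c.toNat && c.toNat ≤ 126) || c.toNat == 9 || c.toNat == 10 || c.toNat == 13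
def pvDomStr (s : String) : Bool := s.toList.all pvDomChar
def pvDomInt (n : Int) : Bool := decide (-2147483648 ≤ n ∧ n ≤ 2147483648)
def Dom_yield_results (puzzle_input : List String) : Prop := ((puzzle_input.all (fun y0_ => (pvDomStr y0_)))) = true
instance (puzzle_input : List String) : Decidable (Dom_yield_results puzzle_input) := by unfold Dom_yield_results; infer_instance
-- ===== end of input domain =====

-- B replaces A's single stateful loop (threading op / accumulator / mid-loop next(ops))
-- by partitioning the columns into blank-separated groups and mapping each (group, op)
-- pair independently to its sum or product (objective: simpler decomposition).
-- Both programs are generators / return-value equivalence on the yielded sequence.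

-- shared helper: zip(*rows) as a list of columns (zip stops at the shortest row;
-- the strict=True ValueError on unequal rows is excluded by Pre_)
def pvCols (rows : List (List Char)) : List (List Char) :=
  (List.range (((rows.map List.length).min?).getD 0)).map
    (fun j => rows.map (fun r => r.getD j ' '))

-- int("".join(num)) — exact (none = ValueError, excluded by Pre_)
def pvParse (c : List Char) : Int := (PySem.Int.ofChars? c).getD 0

-- ===== PORT A =====
def pvInit (op : String) : Int := if op = "+" then 0 else 1

def pvStep (op : String) (accum : Int) (c : List Char) : Int :=
  if op = "+" then accum + pvParse c else accum * pvParse c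

def pvLoopA (bt : List Char) : List (List Char) → List String → String → Int → List Int
  | [], _, _, accum => [accum]
  | num :: rest, ops, op, accum =>
    if num = bt then
      match ops with
      | [] => []  -- next(ops): StopIteration → RuntimeError (outside Pre_)
      | op' :: ops' => accum :: pvLoopA bt rest ops' op' (pvInit op')
    else pvLoopA bt rest ops op (pvStep op accum num)

def yield_results (puzzle_input : List String) : List Int :=
  match PySem.List.pyGet? puzzle_input (-1) with
  | none => []  -- puzzle_input[-1]: IndexError (outside Pre_)
  | some lastLine =>
    match PySem.Str.split₀ (PySem.Str.strip lastLine) with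
    | [] => []  -- first next(ops): StopIteration (outside Pre_)
    | op0 :: ops =>
      let bt := List.replicate (puzzle_input.length - 1) ' '
      let nums := pvCols ((PySem.List.slice puzzle_input none (some (-1))).map String.toList)
      pvLoopA bt nums ops op0 (pvInit op0)

-- ===== PORT B =====
def pvValB (op : String) (g : List (List Char)) : Int :=
  if op = "+" then (g.map pvParse).sum
  else g.foldl (fun v c => v * pvParse c) 1

def yield_results_alt (puzzle_input : List String) : List Int :=
  match puzzle_input.getLast? with
  | none => []  -- unpacking []: ValueError (outside Pre_)
  | some opLine =>
    let numLines := puzzle_input.dropLast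
    let cols := pvCols (numLines.map String.toList)
    let blank := List.replicate numLines.length ' '
    let dc := cols.foldl
      (fun (s : List (List (List Char)) × List (List Char)) c =>
        if c = blank then (s.1 ++ [s.2], []) else (s.1, s.2 ++ [c]))
      ([], [])
    let groups := dc.1 ++ [dc.2]
    let ops := PySem.Str.split₀ (PySem.Str.strip opLine)
    (groups.zip ops).map (fun go => pvValB go.2 go.1)

-- ===== PRECONDITION & SPEC =====
-- Pre_ excludes exactly the inputs on which A raises: the empty list (IndexError),
-- unequal number-line lengths (strict zip ValueError), a non-int non-blank column
-- (ValueError) and fewer op tokens than column groups (StopIteration → RuntimeError).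
def Pre_yield_results (puzzle_input : List String) : Prop :=
  puzzle_input ≠ [] ∧
  (∀ s ∈ puzzle_input.dropLast,
      s.toList.length = ((puzzle_input.dropLast.headD "").toList.length)) ∧
  (let cols := pvCols (puzzle_input.dropLast.map String.toList)
   let blank := List.replicate puzzle_input.dropLast.length ' '
   (cols.countP (· = blank)) + 1 ≤
      (PySem.Str.split₀ (PySem.Str.strip ((puzzle_input.getLast?).getD ""))).length ∧
   ∀ c ∈ cols, c ≠ blank → (PySem.Int.ofChars? c).isSome = true)
instance (puzzle_input : List String) : Decidable (Pre_yield_results puzzle_input) := by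
  unfold Pre_yield_results; infer_instance

def pvWitness_yield_results : List String := ["12", "34", "* +"]

def Spec_yield_results (puzzle_input : List String) (out : List Int) : Prop := out = yield_results_alt puzzle_input
instance (puzzle_input : List String) (out : List Int) : Decidable (Spec_yield_results puzzle_input out) := by unfold Spec_yield_results; infer_instance

-- ===== CLAIM (what is proved, stated in full; the proofs are below) =====
def Claim_equal_yield_results : Prop := ∀ (puzzle_input : List String), Dom_yield_results puzzle_input → Pre_yield_results puzzle_input → Spec_yield_results puzzle_input (yield_results puzzle_input)

-- ===== LEMMAS AND PROOFS =====

-- the groups of consecutive non-blank columns, blanks as separators, empty groups kept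
def pvGsplit (bt : List Char) : List (List Char) → List (List (List Char))
  | [] => [[]]
  | c :: cs =>
    if c = bt then [] :: pvGsplit bt cs
    else
      match pvGsplit bt cs with
      | g :: gs => (c :: g) :: gs
      | [] => [[c]]

theorem pvGsplit_ne_nil (bt : List Char) (cs : List (List Char)) : pvGsplit bt cs ≠ [] := by
  induction cs with
  | nil => simp [pvGsplit]
  | cons c cs ih =>
    simp only [pvGsplit]
    split
    · simp
    · cases h : pvGsplit bt cs with
      | nil => simp
      | cons g gs => simp

theorem pvGroups_eq_gsplit (bt : List Char) (cols : List (List Char)) :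
    ∀ done cur,
      (let s := cols.foldl
        (fun (s : List (List (List Char)) × List (List Char)) c =>
          if c = bt then (s.1 ++ [s.2], []) else (s.1, s.2 ++ [c])) (done, cur)
       s.1 ++ [s.2]) =
      done ++ (match pvGsplit bt cols with
               | g :: gs => (cur ++ g) :: gs
               | [] => [cur]) := by
  induction cols with
  | nil => intro done cur; simp [pvGsplit]
  | cons c cs ih =>
    intro done cur
    simp only [List.foldl_cons, pvGsplit]
    by_cases h : c = bt
    · simp only [h]
      rw [ih]
      cases hg : pvGsplit bt cs with
      | nil => exact absurd hg (pvGsplit_ne_nil bt cs)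
      | cons g gs => simp
    · simp only [if_neg h]
      rw [ih]
      cases hg : pvGsplit bt cs with
      | nil => exact absurd hg (pvGsplit_ne_nil bt cs)
      | cons g gs => simp

theorem pvValB_eq_foldl (op : String) (g : List (List Char)) :
    pvValB op g = g.foldl (pvStep op) (pvInit op) := by
  unfold pvValB pvInit
  by_cases h : op = "+"
  · simp only [h]
    rw [List.sum_eq_foldl, List.foldl_map]
    have hf : pvStep "+" = (fun (x : Int) y => x + pvParse y) := by
      funext a c; simp [pvStep]
    rw [hf]; simp
  · simp only [if_neg h]
    have hf : pvStep op = (fun (v : Int) c => v * pvParse c) := by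
      funext a c; simp [pvStep, if_neg h]
    rw [hf]

theorem pvLoopA_eq (bt : List Char) (cols : List (List Char)) :
    ∀ ops op accum,
      cols.countP (· = bt) ≤ ops.length →
      pvLoopA bt cols ops op accum =
        (match pvGsplit bt cols with
         | [] => []
         | g :: gs =>
            (g.foldl (pvStep op) accum) ::
              (gs.zip ops).map (fun go => pvValB go.2 go.1)) := by
  induction cols with
  | nil => intro ops op accum _; simp [pvLoopA, pvGsplit]
  | cons c cs ih =>
    intro ops op accum hlen
    simp only [pvLoopA, pvGsplit]
    by_cases h : c = bt
    · simp only [h]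
      have hc : cs.countP (· = bt) + 1 ≤ ops.length := by
        have := hlen
        simp [h] at this
        omega
      cases ops with
      | nil => simp at hc
      | cons op' ops' =>
        simp only
        rw [ih ops' op' (pvInit op') (by simpa using hc)]
        cases hg : pvGsplit bt cs with
        | nil => exact absurd hg (pvGsplit_ne_nil bt cs)
        | cons g gs =>
          simp [pvValB_eq_foldl]
    · simp only [if_neg h]
      have hc : cs.countP (· = bt) ≤ ops.length := by
        have := hlen
        simp [h] at this
        omega
      rw [ih ops op (pvStep op accum c) hc]
      cases hg : pvGsplit bt cs with
      | nil => exact absurd hg (pvGsplit_ne_nil bt cs)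
      | cons g gs => simp

-- ===== VERDICT (by name: the statement is the Claim_ definition above) =====
theorem yield_results_spec : Claim_equal_yield_results := by
  intro p _hdom hpre
  obtain ⟨hne, _hlen, hpre2⟩ := hpre
  simp only at hpre2
  obtain ⟨hops, _hparse⟩ := hpre2
  unfold Spec_yield_results yield_results yield_results_alt
  rw [PySem.List.pyGet?_neg_one]
  cases hlast : p.getLast? with
  | none => exact absurd (List.getLast?_eq_none_iff.mp hlast) hne
  | some lastLine =>
    simp only
    rw [hlast] at hops
    simp only [Option.getD_some] at hops
    cases hsplit : PySem.Str.split₀ (PySem.Str.strip lastLine) with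
    | nil => rw [hsplit] at hops; simp at hops
    | cons op0 ops =>
      rw [hsplit] at hops
      simp only [PySem.List.slice_to_neg_one]
      have hlen1 : p.length - 1 = p.dropLast.length := by
        simp [List.length_dropLast]
      rw [hlen1]
      set bt := List.replicate p.dropLast.length ' ' with hbt
      set cols := pvCols (p.dropLast.map String.toList) with hcols
      have hcount : cols.countP (· = bt) ≤ ops.length := by
        simp only [List.length_cons] at hops
        omega
      rw [pvLoopA_eq bt cols ops op0 (pvInit op0) hcount]
      rw [pvGroups_eq_gsplit bt cols [] []]
      cases hg : pvGsplit bt cols with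
      | nil => exact absurd hg (pvGsplit_ne_nil bt cols)
      | cons g gs =>
        simp [pvValB_eq_foldl]
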